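-- pv_equiv track=rewrite | github.com/bili256355/easm_project01 | lead_lag_screen/V1/src/lead_lag_screen_v1/t3_p_v_offset_correspondence_core.py | window_day_indices
-- ===== SOURCE A (Python) =====
-- from typing import Dict, Iterable, List, Tuple
--
-- def window_day_indices(day_map: Dict[int, int], start: int, end: int) -> List[int]:
--     out = []
--     missing = []
--     for d in range(int(start), int(end) + 1):
--         if d in day_map:
--             out.append(day_map[d])
--         else:
--             missing.append(d)
--     if missing:
--         raise KeyError(f"Missing day(s) in field day coordinate: {missing}")
--     return out
-- ===== SOURCE B (Python) =====
-- def window_day_indices(day_map, start, end):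
--     lo, hi = int(start), int(end)
--     missing = sorted(set(range(lo, hi + 1)) - set(day_map))
--     if missing:
--         raise KeyError(f"Missing day(s) in field day coordinate: {missing}")
--     return [day_map[d] for d in range(lo, hi + 1)]
-- ===== Notes on version B (the rewrite author's own statement) =====
-- stated objective: idiomatic
-- what changed: Missing days are found in one set-difference (set(range)-set(day_map)) plus sorted(), and the output is built by a separate comprehension only when nothing is missing, instead of A's single element-by-element loop maintaining two accumulators.
import Mathlib
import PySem

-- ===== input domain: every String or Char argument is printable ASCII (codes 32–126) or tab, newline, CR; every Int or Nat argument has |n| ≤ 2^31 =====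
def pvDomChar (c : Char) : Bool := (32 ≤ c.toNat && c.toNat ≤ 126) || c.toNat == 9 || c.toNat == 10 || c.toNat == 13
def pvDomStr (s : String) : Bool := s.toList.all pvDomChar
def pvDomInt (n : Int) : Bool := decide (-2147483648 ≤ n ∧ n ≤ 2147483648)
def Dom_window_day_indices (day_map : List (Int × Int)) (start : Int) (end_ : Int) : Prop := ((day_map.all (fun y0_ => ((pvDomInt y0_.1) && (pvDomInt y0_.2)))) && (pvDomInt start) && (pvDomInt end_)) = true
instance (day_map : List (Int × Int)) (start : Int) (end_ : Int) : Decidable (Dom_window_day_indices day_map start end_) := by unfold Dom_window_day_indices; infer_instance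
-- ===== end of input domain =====

-- B finds missing days by a set-difference + sort and builds the output in a separate pass,
-- instead of A's single loop with two accumulators; equivalent on all inputs where A returns
-- (Pre_ excludes the inputs where both programs raise KeyError).


-- ===== PORT A =====
-- loop over range(start, end+1) accumulating (out, missing); raise (modelled as []) if missing ≠ []
def window_day_indices (day_map : List (Int × Int)) (start : Int) (end_ : Int) : List Int :=
  let d := PySem.Dict.ofList day_map
  let res := (PySem.List.pyRange start (end_ + 1) 1).foldl
      (fun (acc : List Int × List Int) x =>
        if d.contains x then (acc.1 ++ [d.getD x 0], acc.2) else (acc.1, acc.2 ++ [x]))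
      ([], [])
  if res.2.isEmpty then res.1 else []   -- non-empty missing: Python raises KeyError (outside Pre_)

-- ===== PORT B =====
-- set-difference of the range against the dict keys, sorted; output built by a separate map
def window_day_indices_alt (day_map : List (Int × Int)) (start : Int) (end_ : Int) : List Int :=
  let d := PySem.Dict.ofList day_map
  let days := PySem.List.pyRange start (end_ + 1) 1
  let missing := PySem.List.sorted (PySem.Set.ofList (days.filter (fun x => !(d.contains x)))) (fun x => x) false
  if missing.isEmpty then days.map (fun x => d.getD x 0) else []   -- non-empty: KeyError (outside Pre_)

-- ===== PRECONDITION & SPEC =====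
-- Pre_ excludes exactly the inputs on which A (and B) raise KeyError: some day in the window is missing.
-- The size bound is redundant (the window's distinct days each need an entry) but lets the
-- condition be decided fast when the window is huge and the dict small.
def Pre_window_day_indices (day_map : List (Int × Int)) (start : Int) (end_ : Int) : Prop :=
  end_ < start ∨ (end_ + 1 - start ≤ day_map.length ∧
    ∀ x ∈ PySem.List.pyRange start (end_ + 1) 1, (PySem.Dict.ofList day_map).contains x = true)
instance (day_map : List (Int × Int)) (start : Int) (end_ : Int) : Decidable (Pre_window_day_indices day_map start end_) := by unfold Pre_window_day_indices; infer_instance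
def pvWitness_window_day_indices : (List (Int × Int)) × Int × Int := ([(1, 10), (2, 20), (3, 30)], 1, 3)
def Spec_window_day_indices (day_map : List (Int × Int)) (start : Int) (end_ : Int) (out : List Int) : Prop := out = window_day_indices_alt day_map start end_
instance (day_map : List (Int × Int)) (start : Int) (end_ : Int) (out : List Int) : Decidable (Spec_window_day_indices day_map start end_ out) := by unfold Spec_window_day_indices; infer_instance

-- ===== CLAIM (what is proved, stated in full; the proofs are below) =====
def Claim_equal_window_day_indices : Prop := ∀ (day_map : List (Int × Int)) (start : Int) (end_ : Int), Dom_window_day_indices day_map start end_ → Pre_window_day_indices day_map start end_ → Spec_window_day_indices day_map start end_ (window_day_indices day_map start end_)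

-- ===== LEMMAS AND PROOFS =====

-- A's fold, when every element of the list is present in the dict, produces (acc.1 ++ map, acc.2)
theorem foldA_all_present (d : PySem.Dict Int Int) (l : List Int) (acc : List Int × List Int)
    (h : ∀ x ∈ l, d.contains x = true) :
    l.foldl (fun (acc : List Int × List Int) x =>
        if d.contains x then (acc.1 ++ [d.getD x 0], acc.2) else (acc.1, acc.2 ++ [x])) acc
      = (acc.1 ++ l.map (fun x => d.getD x 0), acc.2) := by
  induction l generalizing acc with
  | nil => simp
  | cons y ys ih =>
    have hy : d.contains y = true := h y (by simp)
    simp only [List.foldl_cons, hy, if_pos, List.map_cons]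
    rw [ih _ (fun x hx => h x (by simp [hx]))]
    simp

theorem filter_not_contains_nil (d : PySem.Dict Int Int) (l : List Int)
    (h : ∀ x ∈ l, d.contains x = true) :
    l.filter (fun x => !(d.contains x)) = [] := by
  rw [List.filter_eq_nil_iff]
  intro x hx
  simp [h x hx]

-- ===== VERDICT (by name: the statement is the Claim_ definition above) =====
theorem window_day_indices_spec : Claim_equal_window_day_indices := by
  intro day_map start end_ _ hpre
  have hall : ∀ x ∈ PySem.List.pyRange start (end_ + 1) 1,
      (PySem.Dict.ofList day_map).contains x = true := by
    rcases hpre with h | ⟨_, h⟩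
    · intro x hx
      rw [PySem.List.pyRange_one_eq_nil (by omega)] at hx
      simp at hx
    · exact h
  unfold Spec_window_day_indices window_day_indices window_day_indices_alt
  dsimp only []
  rw [foldA_all_present _ _ _ hall, filter_not_contains_nil _ _ hall]
  simp [PySem.Set.ofList, PySem.List.sorted]
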